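-- pv_equiv track=rewrite | github.com/pypi-data/pypi-mirror-392 | packages/daplug-cypher/daplug_cypher-1.0.0b8-py3-none-any.whl/daplug_cypher/cypher/serialization.py | _consolidate_relationships
-- ===== SOURCE A (Python) =====
-- from typing import Any, Dict, Iterable, List, cast
--
-- def _consolidate_relationships(relationships: List[Dict[str, List[Dict[str, Any]]]]) -> Dict[str, List[Dict[str, Any]]]:
--     consolidated: Dict[str, List[Dict[str, Any]]] = {}
--     for relationship in relationships:
--         for label, nodes in relationship.items():
--             consolidated.setdefault(label, [])
--             for node in nodes:
--                 if _unique_node(node, consolidated[label]):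
--                     consolidated[label].append(node)
--     return consolidated
--
-- def _unique_node(node: Dict[str, Any], node_group: List[Dict[str, Any]]) -> bool:
--     return node not in node_group
-- ===== SOURCE B (Python) =====
-- from typing import Any, Dict, List
--
--
-- def _consolidate_relationships(relationships: List[Dict[str, List[Dict[str, Any]]]]) -> Dict[str, List[Dict[str, Any]]]:
--     # Pass 1: merge — collect every node per label, labels in first-encounter order, no dedup.
--     gathered: Dict[str, List[Dict[str, Any]]] = {}
--     for relationship in relationships:
--         for label, nodes in relationship.items():
--             gathered.setdefault(label, []).extend(nodes)
--     # Pass 2: dedup each label's combined list, keeping first occurrences.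
--     result: Dict[str, List[Dict[str, Any]]] = {}
--     for label, nodes in gathered.items():
--         deduped: List[Dict[str, Any]] = []
--         for node in nodes:
--             if node not in deduped:
--                 deduped.append(node)
--         result[label] = deduped
--     return result
-- ===== Notes on version B (the rewrite author's own statement) =====
-- stated objective: alternative
-- what changed: A interleaves merging and dedup (membership test against the growing consolidated list inside the nested loop); B first concatenates all nodes per label in one pass and then dedups each label's combined list in a separate pass.
import Mathlib
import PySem

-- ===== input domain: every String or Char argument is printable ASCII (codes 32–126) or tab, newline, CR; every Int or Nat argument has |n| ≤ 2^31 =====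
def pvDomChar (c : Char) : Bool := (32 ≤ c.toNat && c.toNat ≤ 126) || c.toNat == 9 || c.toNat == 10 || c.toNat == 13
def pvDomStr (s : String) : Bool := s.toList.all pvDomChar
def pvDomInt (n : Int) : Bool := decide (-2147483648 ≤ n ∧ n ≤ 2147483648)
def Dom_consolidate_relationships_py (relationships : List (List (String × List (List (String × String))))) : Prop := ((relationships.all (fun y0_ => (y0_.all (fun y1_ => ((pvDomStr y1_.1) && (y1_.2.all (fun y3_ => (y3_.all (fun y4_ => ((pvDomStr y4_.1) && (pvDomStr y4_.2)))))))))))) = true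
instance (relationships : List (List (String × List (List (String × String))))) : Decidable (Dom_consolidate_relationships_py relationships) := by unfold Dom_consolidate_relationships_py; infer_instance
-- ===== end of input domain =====

-- B separates merging (one gathering pass per label) from deduplication (a second pass over the
-- gathered lists); A interleaves them. Equivalence of the returned dict is proved; no speed claim.

-- Python '==' on two node dicts (represented as assoc lists): same keys and same value at each key
-- (first-match lookup; exact for the convention's unique-key dict representation).
def pvNodeEq (a b : List (String × String)) : Bool :=
  (a.all fun p => match b.find? (fun q => q.1 == p.1) with
    | some q => q.2 == p.2
    | none => false) &&
  (b.all fun p => match a.find? (fun q => q.1 == p.1) with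
    | some q => q.2 == p.2
    | none => false)

-- ===== PORT A =====
-- _unique_node(node, node_group) = node not in node_group
def pv_unique_node (node : List (String × String)) (node_group : List (List (String × String))) : Bool :=
  !(node_group.any (fun m => pvNodeEq node m))

-- body of A's innermost 'for node in nodes' loop
def pvStepA (label : String) (d : PySem.Dict String (List (List (String × String)))) (node : List (String × String)) : PySem.Dict String (List (List (String × String))) :=
  if pv_unique_node node (d.getD label []) then d.insert label ((d.getD label []) ++ [node]) else d

def consolidate_relationships_py (relationships : List (List (String × List (List (String × String))))) : List (String × List (List (String × String))) :=
  (relationships.foldl (fun cons rel =>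
      rel.foldl (fun cons lp => lp.2.foldl (pvStepA lp.1) (cons.setdefault lp.1 [])) cons)
    (PySem.Dict.empty : PySem.Dict String (List (List (String × String))))).items

-- ===== PORT B =====
-- body of B's dedup loop: 'if node not in deduped: deduped.append(node)'
def pvDedupStep (acc : List (List (String × String))) (node : List (String × String)) : List (List (String × String)) :=
  if acc.any (fun m => pvNodeEq node m) then acc else acc ++ [node]

def pvDedup (nodes : List (List (String × String))) : List (List (String × String)) :=
  nodes.foldl pvDedupStep []

def consolidate_relationships_py_alt (relationships : List (List (String × List (List (String × String))))) : List (String × List (List (String × String))) :=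
  -- pass 1: gathered.setdefault(label, []).extend(nodes)
  let gathered := relationships.foldl (fun g rel =>
      rel.foldl (fun g lp => g.insert lp.1 ((g.getD lp.1 []) ++ lp.2)) g)
    (PySem.Dict.empty : PySem.Dict String (List (List (String × String))))
  -- pass 2: result[label] = deduped, per gathered label in order
  (gathered.items.foldl (fun r lv => r.insert lv.1 (pvDedup lv.2))
    (PySem.Dict.empty : PySem.Dict String (List (List (String × String))))).items

-- ===== PRECONDITION & SPEC =====
def Spec_consolidate_relationships_py (relationships : List (List (String × List (List (String × String))))) (out : List (String × List (List (String × String)))) : Prop := out = consolidate_relationships_py_alt relationships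
instance (relationships : List (List (String × List (List (String × String))))) (out : List (String × List (List (String × String)))) : Decidable (Spec_consolidate_relationships_py relationships out) := by unfold Spec_consolidate_relationships_py; infer_instance

-- ===== CLAIM (what is proved, stated in full; the proofs are below) =====
def Claim_equal_consolidate_relationships_py : Prop := ∀ (relationships : List (List (String × List (List (String × String))))), Dom_consolidate_relationships_py relationships → Spec_consolidate_relationships_py relationships (consolidate_relationships_py relationships)

-- ===== LEMMAS AND PROOFS =====

-- value transformer linking A's consolidated dict to B's gathered dict
def pvF2 (lv : String × List (List (String × String))) : String × List (List (String × String)) :=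
  (lv.1, pvDedup lv.2)

-- the loop invariant relating A's dict to B's gathered dict
def pvInv (d g : PySem.Dict String (List (List (String × String)))) : Prop :=
  d.items = g.items.map pvF2 ∧ g.keys.Nodup

theorem pv_keys_of_items (d g : PySem.Dict String (List (List (String × String))))
    (h : d.items = g.items.map pvF2) : d.keys = g.keys := by
  show d.items.map Prod.fst = g.items.map Prod.fst
  rw [h, List.map_map]
  rfl

theorem pv_insert_self_of_contains (d : PySem.Dict String (List (List (String × String))))
    (k : String) (hnd : d.keys.Nodup) (hc : d.contains k = true) :
    d.insert k (d.getD k []) = d := by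
  apply PySem.Dict.ext
  rw [PySem.Dict.items_insert_of_contains d _ hc]
  have : ∀ p ∈ d.items, (fun p => if p.1 == k then (k, d.getD k []) else p) p = p := by
    intro p hp
    by_cases hpk : p.1 = k
    · have hmem : (k, p.2) ∈ d.items := by rw [← hpk]; exact hp
      simp only [hpk, beq_self_eq_true, if_pos]
      rw [PySem.Dict.getD_of_mem_items d hmem hnd, ← hpk]
    · simp [hpk]
  calc d.items.map (fun p => if p.1 == k then (k, d.getD k []) else p)
      = d.items.map id := List.map_congr_left this
    _ = d.items := List.map_id d.items

theorem pv_getD_of_inv (d g : PySem.Dict String (List (List (String × String)))) (label : String)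
    (h : d.items = g.items.map pvF2) (hnd : g.keys.Nodup) (hc : g.contains label = true) :
    d.getD label [] = pvDedup (g.getD label []) := by
  have hs : (g.get? label).isSome := by rw [← PySem.Dict.contains_eq_isSome_get?]; exact hc
  obtain ⟨v, hv⟩ := Option.isSome_iff_exists.mp hs
  have hmemg : (label, v) ∈ g.items := PySem.Dict.mem_items_of_get?_eq_some g hv
  have hmemd : (label, pvDedup v) ∈ d.items := by
    rw [h]; exact List.mem_map.mpr ⟨(label, v), hmemg, rfl⟩
  have hndd : d.keys.Nodup := by rw [pv_keys_of_items d g h]; exact hnd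
  rw [PySem.Dict.getD_of_mem_items d hmemd hndd, PySem.Dict.getD_of_get?_eq_some g [] hv]

theorem pv_inner (label : String) (nodes : List (List (String × String)))
    (d : PySem.Dict String (List (List (String × String)))) (vs : List (List (String × String))) :
    nodes.foldl (pvStepA label) (d.insert label vs) = d.insert label (nodes.foldl pvDedupStep vs) := by
  induction nodes generalizing vs with
  | nil => rfl
  | cons n ns ih =>
    have hstep : pvStepA label (d.insert label vs) n = d.insert label (pvDedupStep vs n) := by
      by_cases h : vs.any (fun m => pvNodeEq n m)
      · simp [pvStepA, pvDedupStep, pv_unique_node, PySem.Dict.getD_insert_self, h]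
      · simp [pvStepA, pvDedupStep, pv_unique_node, PySem.Dict.getD_insert_self, h,
          PySem.Dict.insert_insert_self]
    simp only [List.foldl_cons, hstep, ih]

theorem pv_label_step (lp : String × List (List (String × String)))
    (d g : PySem.Dict String (List (List (String × String)))) (hInv : pvInv d g) :
    pvInv (lp.2.foldl (pvStepA lp.1) (d.setdefault lp.1 []))
          (g.insert lp.1 ((g.getD lp.1 []) ++ lp.2)) := by
  obtain ⟨hi, hnd⟩ := hInv
  have hk : d.keys = g.keys := pv_keys_of_items d g hi
  have hndd : d.keys.Nodup := by rw [hk]; exact hnd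
  have hcd : d.contains lp.1 = g.contains lp.1 := by
    rw [PySem.Dict.contains_eq_decide_mem_keys, PySem.Dict.contains_eq_decide_mem_keys, hk]
  have hcat : ∀ gv : List (List (String × String)),
      pvDedup (gv ++ lp.2) = lp.2.foldl pvDedupStep (pvDedup gv) := by
    intro gv; simp [pvDedup, List.foldl_append]
  by_cases hc : g.contains lp.1 = true
  · have hA : lp.2.foldl (pvStepA lp.1) (d.setdefault lp.1 [])
        = d.insert lp.1 (pvDedup ((g.getD lp.1 []) ++ lp.2)) := by
      rw [PySem.Dict.setdefault_of_contains d _ (hcd.trans hc)]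
      conv_lhs => rw [← pv_insert_self_of_contains d lp.1 hndd (hcd.trans hc)]
      rw [pv_inner, pv_getD_of_inv d g lp.1 hi hnd hc, hcat]
    rw [hA]
    refine ⟨?_, PySem.Dict.nodup_keys_insert g lp.1 _ hnd⟩
    rw [PySem.Dict.items_insert_of_contains d _ (hcd.trans hc),
        PySem.Dict.items_insert_of_contains g _ hc, hi, List.map_map, List.map_map]
    apply List.map_congr_left
    intro p _
    by_cases hpk : p.1 = lp.1 <;> simp [pvF2, hpk]
  · have hcf : g.contains lp.1 = false := by simpa using hc
    have hcdf : d.contains lp.1 = false := by rw [hcd]; exact hcf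
    have hA : lp.2.foldl (pvStepA lp.1) (d.setdefault lp.1 [])
        = d.insert lp.1 (pvDedup lp.2) := by
      rw [PySem.Dict.setdefault_of_not_contains d _ hcdf, pv_inner]
      rfl
    rw [hA, PySem.Dict.getD_of_not_contains g _ hcf]
    refine ⟨?_, PySem.Dict.nodup_keys_insert g lp.1 _ hnd⟩
    rw [PySem.Dict.items_insert_of_not_contains d _ hcdf,
        PySem.Dict.items_insert_of_not_contains g _ hcf, hi, List.map_append]
    rfl

theorem pv_foldl_rel {α δ γ : Type} (R : δ → γ → Prop) (fA : δ → α → δ) (fG : γ → α → γ)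
    (h : ∀ d g x, R d g → R (fA d x) (fG g x)) :
    ∀ (l : List α) (d : δ) (g : γ), R d g → R (l.foldl fA d) (l.foldl fG g) := by
  intro l
  induction l with
  | nil => intro d g hr; exact hr
  | cons x xs ih => intro d g hr; exact ih _ _ (h d g x hr)

-- ===== VERDICT (by name: the statement is the Claim_ definition above) =====
theorem consolidate_relationships_py_spec : Claim_equal_consolidate_relationships_py := by
  intro relationships _
  show consolidate_relationships_py relationships = consolidate_relationships_py_alt relationships
  unfold consolidate_relationships_py consolidate_relationships_py_alt
  have hbase : pvInv PySem.Dict.empty PySem.Dict.empty :=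
    ⟨rfl, PySem.Dict.nodup_keys_empty⟩
  have hInv := pv_foldl_rel pvInv
    (fun cons rel => rel.foldl (fun cons lp => lp.2.foldl (pvStepA lp.1) (cons.setdefault lp.1 [])) cons)
    (fun g rel => rel.foldl (fun g lp => g.insert lp.1 ((g.getD lp.1 []) ++ lp.2)) g)
    (fun d g rel hr => pv_foldl_rel pvInv _ _ (fun d g lp hr => pv_label_step lp d g hr) rel d g hr)
    relationships PySem.Dict.empty PySem.Dict.empty hbase
  obtain ⟨hi, hnd⟩ := hInv
  rw [hi, PySem.Dict.items_foldl_insert_fresh _ _ _ _ (by intro a _; rfl) hnd]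
  rfl
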